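-- pv_equiv track=rewrite | github.com/sourcehold/sourcehold-maps | imaging1.py | lowest_in_range
-- ===== SOURCE A (Python) =====
-- def lowest_in_range(dc, ifrom, ito, jfrom, jto):
--     lowest = None
--     for i in range(ifrom, ito):
--         for j in range(jfrom, jto):
--             if dc[i][j] == None:
--                 continue
--             if lowest == None:
--                 lowest = dc[i][j]
--             if dc[i][j] < lowest:
--                 lowest = dc[i][j]
--     return lowest
-- ===== SOURCE B (Python) =====
-- def lowest_in_range(dc, ifrom, ito, jfrom, jto):
--     row_mins = []
--     for i in range(ifrom, ito):
--         vals = [dc[i][j] for j in range(jfrom, jto) if dc[i][j] is not None]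
--         if vals:
--             row_mins.append(min(vals))
--     return min(row_mins) if row_mins else None
-- ===== Notes on version B (the rewrite author's own statement) =====
-- stated objective: alternative
-- what changed: Replaces the single flat running-min scan over the rectangle by per-row minima (computed with a comprehension and built-in min) followed by a final reduction over the collected row minima.
import Mathlib
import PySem

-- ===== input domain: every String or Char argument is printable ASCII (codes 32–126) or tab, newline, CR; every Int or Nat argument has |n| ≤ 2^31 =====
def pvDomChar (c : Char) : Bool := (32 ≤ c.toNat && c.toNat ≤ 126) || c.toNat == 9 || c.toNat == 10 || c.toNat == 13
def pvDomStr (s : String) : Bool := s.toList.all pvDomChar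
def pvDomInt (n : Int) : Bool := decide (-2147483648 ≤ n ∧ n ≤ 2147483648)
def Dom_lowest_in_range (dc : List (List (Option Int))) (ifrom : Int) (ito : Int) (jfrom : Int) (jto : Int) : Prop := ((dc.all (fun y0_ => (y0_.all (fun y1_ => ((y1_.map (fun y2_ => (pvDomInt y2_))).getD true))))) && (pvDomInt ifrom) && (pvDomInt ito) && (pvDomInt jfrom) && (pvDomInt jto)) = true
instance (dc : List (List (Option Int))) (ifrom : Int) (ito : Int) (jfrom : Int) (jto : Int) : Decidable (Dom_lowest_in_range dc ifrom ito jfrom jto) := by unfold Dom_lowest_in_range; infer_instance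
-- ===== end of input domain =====

-- B computes per-row minima and then reduces them, instead of A's single flat running-min scan; same cost, different decomposition.

-- ===== PORT A =====
def lowest_in_range (dc : List (List (Option Int))) (ifrom : Int) (ito : Int) (jfrom : Int) (jto : Int) : Option Int :=
  (PySem.List.pyRange ifrom ito 1).foldl (fun lowest i =>
    (PySem.List.pyRange jfrom jto 1).foldl (fun lowest j =>
      match PySem.List.pyGetD (PySem.List.pyGetD dc i []) j none with
      | none => lowest                       -- 'if dc[i][j] == None: continue'
      | some v =>
        let lowest := if lowest = none then some v else lowest   -- 'if lowest == None: lowest = dc[i][j]'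
        match lowest with                                        -- 'if dc[i][j] < lowest: lowest = dc[i][j]'
        | some l => if v < l then some v else some l
        | none => none) lowest) none

-- ===== PORT B =====
def lowest_in_range_alt (dc : List (List (Option Int))) (ifrom : Int) (ito : Int) (jfrom : Int) (jto : Int) : Option Int :=
  let row_mins : List Int :=
    (PySem.List.pyRange ifrom ito 1).foldl (fun acc i =>
      let vals : List Int :=
        (PySem.List.pyRange jfrom jto 1).filterMap (fun j =>
          PySem.List.pyGetD (PySem.List.pyGetD dc i []) j none)
      match PySem.List.min? vals (fun x => x) with   -- 'if vals: row_mins.append(min(vals))'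
      | none => acc
      | some m => acc ++ [m]) []
  PySem.List.min? row_mins (fun x => x)              -- 'min(row_mins) if row_mins else None'

-- ===== PRECONDITION & SPEC =====
-- Pre_ excludes exactly the inputs on which Python A raises IndexError (a row or column
-- index of the requested rectangle out of range, negative wraparound included).
def Pre_lowest_in_range (dc : List (List (Option Int))) (ifrom : Int) (ito : Int) (jfrom : Int) (jto : Int) : Prop :=
  ito - ifrom ≤ 0 ∨ jto - jfrom ≤ 0 ∨
    ((-(dc.length : Int) ≤ ifrom ∧ ito ≤ (dc.length : Int)) ∧
      ∀ p ∈ dc.zipIdx,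
        ((ifrom ≤ (p.2 : Int) ∧ (p.2 : Int) + 1 ≤ ito) ∨
         (ifrom ≤ (p.2 : Int) - (dc.length : Int) ∧ (p.2 : Int) - (dc.length : Int) + 1 ≤ ito)) →
          (-(p.1.length : Int) ≤ jfrom ∧ jto ≤ (p.1.length : Int)))
instance (dc : List (List (Option Int))) (ifrom : Int) (ito : Int) (jfrom : Int) (jto : Int) : Decidable (Pre_lowest_in_range dc ifrom ito jfrom jto) := by unfold Pre_lowest_in_range; infer_instance

def pvWitness_lowest_in_range : List (List (Option Int)) × Int × Int × Int × Int :=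
  ([[some 3, none], [some 1, some 2]], 0, 2, 0, 2)

def Spec_lowest_in_range (dc : List (List (Option Int))) (ifrom : Int) (ito : Int) (jfrom : Int) (jto : Int) (out : Option Int) : Prop := out = lowest_in_range_alt dc ifrom ito jfrom jto
instance (dc : List (List (Option Int))) (ifrom : Int) (ito : Int) (jfrom : Int) (jto : Int) (out : Option Int) : Decidable (Spec_lowest_in_range dc ifrom ito jfrom jto out) := by unfold Spec_lowest_in_range; infer_instance

-- ===== CLAIM (what is proved, stated in full; the proofs are below) =====
def Claim_equal_lowest_in_range : Prop := ∀ (dc : List (List (Option Int))) (ifrom : Int) (ito : Int) (jfrom : Int) (jto : Int), Dom_lowest_in_range dc ifrom ito jfrom jto → Pre_lowest_in_range dc ifrom ito jfrom jto → Spec_lowest_in_range dc ifrom ito jfrom jto (lowest_in_range dc ifrom ito jfrom jto)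

-- ===== LEMMAS AND PROOFS =====

-- the running-min step A maintains on the optional accumulator
def pstep (o : Option Int) (v : Int) : Option Int :=
  match o with
  | none => some v
  | some l => some (min l v)

theorem stepA_eq (o : Option Int) (v : Int) :
    (let lowest := if o = none then some v else o;
     match lowest with
     | some l => if v < l then some v else some l
     | none => none) = pstep o v := by
  cases o with
  | none => simp [pstep]
  | some l =>
    simp only [pstep, reduceCtorEq, if_false]
    rw [min_def]
    split_ifs <;> simp <;> omega

theorem foldl_skip (f : Int → Option Int) (js : List Int) (o : Option Int) :
    js.foldl (fun lowest j =>
      match f j with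
      | none => lowest
      | some v =>
        let lowest := if lowest = none then some v else lowest
        match lowest with
        | some l => if v < l then some v else some l
        | none => none) o = (js.filterMap f).foldl pstep o := by
  induction js generalizing o with
  | nil => rfl
  | cons j js ih =>
    simp only [List.foldl_cons, List.filterMap_cons]
    cases h : f j with
    | none =>
      simp only [h]
      exact ih o
    | some v =>
      simp only [h]
      rw [stepA_eq]
      exact ih (pstep o v)

theorem foldl_min_pull (t : List Int) : ∀ (x a : Int),
    t.foldl min (min x a) = min x (t.foldl min a) := by
  induction t with
  | nil => intro x a; rfl
  | cons b t ih =>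
    intro x a
    simp only [List.foldl_cons]
    rw [min_assoc, ih]

theorem foldl_pstep_some (t : List Int) (a : Int) :
    t.foldl pstep (some a) = some (t.foldl min a) := by
  induction t generalizing a with
  | nil => rfl
  | cons b t ih => simp [List.foldl_cons, pstep, ih]

theorem min?_eq_foldl_pstep (l : List Int) :
    PySem.List.min? l (fun x => x) = l.foldl pstep none := by
  cases l with
  | nil => rfl
  | cons a t =>
    rw [PySem.List.min?_id_cons]
    simp [List.foldl_cons, pstep, foldl_pstep_some]

theorem foldl_pstep_min? (l : List Int) (o : Option Int) :
    l.foldl pstep o =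
      match PySem.List.min? l (fun x => x) with
      | none => o
      | some m => pstep o m := by
  cases l with
  | nil => rfl
  | cons a t =>
    rw [PySem.List.min?_id_cons]
    cases o with
    | none => simp [List.foldl_cons, pstep, foldl_pstep_some]
    | some x =>
      simp [List.foldl_cons, pstep, foldl_pstep_some, foldl_min_pull]

theorem main_fold (is : List Int) (row : Int → List Int) (o : Option Int) :
    is.foldl (fun o i => (row i).foldl pstep o) o
      = (is.filterMap (fun i => PySem.List.min? (row i) (fun x => x))).foldl pstep o := by
  induction is generalizing o with
  | nil => rfl
  | cons i is ih =>
    simp only [List.foldl_cons, List.filterMap_cons]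
    cases h : PySem.List.min? (row i) (fun x => x) with
    | none =>
      have hrow : (row i).foldl pstep o = o := by
        rw [foldl_pstep_min?, h]
      rw [hrow, ih]
    | some m =>
      have hrow : (row i).foldl pstep o = pstep o m := by
        rw [foldl_pstep_min?, h]
      rw [hrow, ih, List.foldl_cons]

theorem accum_fold (g : Int → Option Int) (is : List Int) (acc : List Int) :
    is.foldl (fun acc i =>
      match g i with
      | none => acc
      | some m => acc ++ [m]) acc = acc ++ is.filterMap g := by
  induction is generalizing acc with
  | nil => simp
  | cons i is ih =>
    cases h : g i with
    | none => simp [List.foldl_cons, List.filterMap_cons, h, ih]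
    | some m => simp [List.foldl_cons, List.filterMap_cons, h, ih]

-- ===== VERDICT (by name: the statement is the Claim_ definition above) =====
theorem lowest_in_range_spec : Claim_equal_lowest_in_range := by
  intro dc ifrom ito jfrom jto _ _
  unfold Spec_lowest_in_range lowest_in_range lowest_in_range_alt
  rw [accum_fold]
  simp only [List.nil_append]
  have hinner : (fun (lowest : Option Int) (i : Int) =>
      (PySem.List.pyRange jfrom jto 1).foldl (fun lowest j =>
        match PySem.List.pyGetD (PySem.List.pyGetD dc i []) j none with
        | none => lowest
        | some v =>
          let lowest := if lowest = none then some v else lowest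
          match lowest with
          | some l => if v < l then some v else some l
          | none => none) lowest)
      = (fun (lowest : Option Int) (i : Int) =>
        ((PySem.List.pyRange jfrom jto 1).filterMap
          (fun j => PySem.List.pyGetD (PySem.List.pyGetD dc i []) j none)).foldl pstep lowest) := by
    funext o i
    exact foldl_skip _ _ _
  rw [hinner, main_fold, min?_eq_foldl_pstep]
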